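-- pv_equiv track=rewrite | github.com/DnlRKorn/AraxNPZ | get_mondo_for_ct.py | checkSubstringInCondNames
-- ===== SOURCE A (Python) =====
-- from collections.abc import Iterable
--
-- def checkSubstringInCondNames(cond_iter : Iterable, matches_found : set, mondo_dict : dict, step_num : int=-1) -> (dict,dict):
-- #    condname_to_matchname = {}
-- #    condname_to_mondo = {}
-- #    condname_to_inexact_matches = {}
--     inexact_hits = []
--     for cond_name in cond_iter:
--         #We check only those conditions for which we haven't yet found a match.
--         if(cond_name not in matches_found):
--             hits = [(cond_name,key,mondo_dict[key],step_num) for key in mondo_dict.keys() if cond_name in key]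
--             inexact_hits.extend(hits)
--             #condname_to_inexact_matches[cond_name] = hits
--             '''if(len(hit_names)>=1):
--                 hit_name = hit_names[0]
--                 condname_to_matchname[cond_name] = hit_name
--                 condname_to_mondo[cond_name] = mondo_dict[hit_name]'''
--     return inexact_hits
-- ===== SOURCE B (Python) =====
-- def checkSubstringInCondNames(cond_iter, matches_found, mondo_dict, step_num=-1):
--     # Substring-index strategy: instead of testing every condition against every
--     # key, enumerate the distinct substrings of each key once and look each up in
--     # a bucket table keyed by the still-unmatched conditions; finally emit the
--     # buckets in condition order.
--     wanted = [c for c in cond_iter if c not in matches_found]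
--     buckets = {c: [] for c in wanted}
--     for key, value in mondo_dict.items():
--         n = len(key)
--         subs = {key[i:j] for i in range(n + 1) for j in range(i, n + 1)}
--         for c in subs:
--             if c in buckets:
--                 buckets[c].append((key, value))
--     return [(c, key, value, step_num) for c in wanted for (key, value) in buckets[c]]
-- ===== Notes on version B (the rewrite author's own statement) =====
-- stated objective: faster
-- what changed: Instead of testing every condition against every key, B enumerates the distinct substrings of each dictionary key once and looks each up in a bucket table keyed by the still-unmatched conditions, then concatenates the buckets in condition order.
import Mathlib
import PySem

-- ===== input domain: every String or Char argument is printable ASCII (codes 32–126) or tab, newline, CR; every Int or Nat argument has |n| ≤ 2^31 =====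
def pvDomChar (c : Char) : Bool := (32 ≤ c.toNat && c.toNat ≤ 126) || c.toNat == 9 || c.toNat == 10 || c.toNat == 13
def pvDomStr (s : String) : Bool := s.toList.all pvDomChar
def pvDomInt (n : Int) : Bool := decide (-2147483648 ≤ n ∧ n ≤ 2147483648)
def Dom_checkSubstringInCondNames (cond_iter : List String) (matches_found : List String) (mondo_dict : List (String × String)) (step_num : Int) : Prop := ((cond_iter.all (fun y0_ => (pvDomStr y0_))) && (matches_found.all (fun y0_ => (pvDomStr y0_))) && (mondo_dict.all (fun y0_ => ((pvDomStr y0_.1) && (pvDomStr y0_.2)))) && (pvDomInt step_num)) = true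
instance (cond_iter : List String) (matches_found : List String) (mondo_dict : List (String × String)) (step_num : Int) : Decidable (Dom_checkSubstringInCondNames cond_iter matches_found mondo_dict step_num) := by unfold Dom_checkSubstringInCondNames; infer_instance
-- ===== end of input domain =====

-- B replaces A's condition-by-condition scan of all keys with a substring index:
-- each key's distinct substrings are enumerated once and looked up in a bucket
-- table keyed by the unmatched conditions; return values proved equal on Pre_.

-- ===== PORT A =====
-- A: for each cond_name not yet matched, scan all dict keys, collecting
-- (cond_name, key, mondo_dict[key], step_num) for keys containing cond_name.
-- mondo_dict[key] is first-match lookup; key is drawn from the keys themselves,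
-- so the lookup always succeeds and the getD default is unreachable.
def checkSubstringInCondNames (cond_iter : List String) (matches_found : List String) (mondo_dict : List (String × String)) (step_num : Int) : List (String × String × String × Int) :=
  cond_iter.foldl
    (fun inexact_hits cond_name =>
      if matches_found.contains cond_name = false then
        inexact_hits ++
          ((mondo_dict.map Prod.fst).filter (fun key => PySem.Str.isIn cond_name key)).map
            (fun key => (cond_name, key, ((mondo_dict.find? (fun p => p.1 == key)).getD ("", "")).2, step_num))
      else inexact_hits)
    []

-- ===== PORT B =====
-- B: wanted = unmatched conditions; buckets = {c: [] for c in wanted}; one pass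
-- over the dict items: the set of substrings key[i:j] of each key is built once
-- and each substring that is a bucket key appends (key, value) to its bucket;
-- the result concatenates the buckets in wanted order.  Source B iterates the Python
-- set 'subs' in hash order; each element touches a distinct bucket at most once,
-- so the resulting buckets do not depend on that order and the port folds over
-- the PySem.Set in its construction order.
def checkSubstringInCondNames_alt (cond_iter : List String) (matches_found : List String) (mondo_dict : List (String × String)) (step_num : Int) : List (String × String × String × Int) :=
  let wanted := cond_iter.filter (fun c => matches_found.contains c = false)
  let buckets0 : PySem.Dict String (List (String × String)) :=
    wanted.foldl (fun b c => b.insert c []) PySem.Dict.empty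
  let buckets :=
    mondo_dict.foldl
      (fun b kv =>
        let n := PySem.Str.len kv.1
        let subs : PySem.Set String := PySem.Set.ofList
          ((PySem.List.pyRange 0 (n + 1) 1).flatMap (fun i =>
            (PySem.List.pyRange i (n + 1) 1).map (fun j => PySem.Str.slice kv.1 (some i) (some j))))
        subs.foldl (fun b c => if b.contains c then b.modify c [] (fun l => l ++ [kv]) else b) b)
      buckets0
  wanted.flatMap (fun c => (buckets.getD c []).map (fun kv => (c, kv.1, kv.2, step_num)))

-- ===== PRECONDITION & SPEC =====
-- Pre_ only excludes association lists with a duplicated key: those do not represent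
-- any Python dict (a real dict's keys are unique), so no input A accepts is excluded.
def Pre_checkSubstringInCondNames (cond_iter : List String) (matches_found : List String) (mondo_dict : List (String × String)) (step_num : Int) : Prop :=
  (mondo_dict.map Prod.fst).Nodup
instance (cond_iter : List String) (matches_found : List String) (mondo_dict : List (String × String)) (step_num : Int) : Decidable (Pre_checkSubstringInCondNames cond_iter matches_found mondo_dict step_num) := by unfold Pre_checkSubstringInCondNames; infer_instance

def pvWitness_checkSubstringInCondNames : List String × List String × (List (String × String)) × Int :=
  (["ab", "c"], ["c"], [("xaby", "m1"), ("ab", "m2")], 7)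

def Spec_checkSubstringInCondNames (cond_iter : List String) (matches_found : List String) (mondo_dict : List (String × String)) (step_num : Int) (out : List (String × String × String × Int)) : Prop := out = checkSubstringInCondNames_alt cond_iter matches_found mondo_dict step_num
instance (cond_iter : List String) (matches_found : List String) (mondo_dict : List (String × String)) (step_num : Int) (out : List (String × String × String × Int)) : Decidable (Spec_checkSubstringInCondNames cond_iter matches_found mondo_dict step_num out) := by unfold Spec_checkSubstringInCondNames; infer_instance

-- ===== CLAIM (what is proved, stated in full; the proofs are below) =====
def Claim_equal_checkSubstringInCondNames : Prop := ∀ (cond_iter : List String) (matches_found : List String) (mondo_dict : List (String × String)) (step_num : Int), Dom_checkSubstringInCondNames cond_iter matches_found mondo_dict step_num → Pre_checkSubstringInCondNames cond_iter matches_found mondo_dict step_num → Spec_checkSubstringInCondNames cond_iter matches_found mondo_dict step_num (checkSubstringInCondNames cond_iter matches_found mondo_dict step_num)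

-- ===== LEMMAS AND PROOFS =====

-- A's accumulating loop is the flatMap of the per-condition hit lists over the kept conditions.
theorem foldl_append_if_flatMap {α β : Type} (p : α → Prop) [DecidablePred p] (g : α → List β) :
    ∀ (l : List α) (acc : List β),
      l.foldl (fun acc x => if p x then acc ++ g x else acc) acc
        = acc ++ (l.filter (fun x => decide (p x))).flatMap g := by
  intro l
  induction l with
  | nil => intro acc; simp
  | cons x xs ih =>
    intro acc
    by_cases h : p x <;> simp [List.foldl_cons, h, ih]

-- first-match lookup of a key of a Nodup association list returns its pair
theorem find?_of_mem_nodup (l : List (String × String)) (kv : String × String)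
    (hnd : (l.map Prod.fst).Nodup) (hm : kv ∈ l) :
    l.find? (fun p => p.1 == kv.1) = some kv := by
  induction l with
  | nil => cases hm
  | cons q qs ih =>
    simp only [List.map_cons, List.nodup_cons] at hnd
    rcases List.mem_cons.mp hm with h | h
    · subst h; simp
    · have hne : (q.1 == kv.1) = false := by
        simp only [beq_eq_false_iff_ne, ne_eq]
        intro he
        exact hnd.1 (he ▸ List.mem_map_of_mem h)
      simp [hne, ih hnd.2 h]

-- every bucket of the initial dict (inserts of []) is empty
theorem getD_init_buckets (l : List String) :
    ∀ (b : PySem.Dict String (List (String × String))),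
      (∀ c, b.getD c [] = []) →
      ∀ c, (l.foldl (fun b c => b.insert c []) b).getD c [] = [] := by
  induction l with
  | nil => intro b hb c; exact hb c
  | cons x xs ih =>
    intro b hb c
    refine ih _ (fun c' => ?_) c
    rw [PySem.Dict.getD_insert]
    split <;> simp [hb]

-- the enumerated slices key[i:j] are exactly the substrings of key
theorem mem_slices_iff_isIn (key c : String) :
    (c ∈ (PySem.List.pyRange 0 (PySem.Str.len key + 1) 1).flatMap (fun i =>
        (PySem.List.pyRange i (PySem.Str.len key + 1) 1).map (fun j =>
          PySem.Str.slice key (some i) (some j))))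
      ↔ PySem.Str.isIn c key = true := by
  rw [PySem.Str.isIn_iff_infix]
  constructor
  · intro hm
    obtain ⟨i, hi, hmap⟩ := List.mem_flatMap.mp hm
    obtain ⟨j, hj, hc⟩ := List.mem_map.mp hmap
    rw [PySem.List.mem_pyRange_one] at hi hj
    have h0i : 0 ≤ i := hi.1
    subst hc
    rw [PySem.Str.toList_slice]
    show PySem.List.slice _ _ _ <:+: _
    rw [PySem.List.slice_toNat _ h0i (le_trans h0i hj.1)]
    exact ((key.toList.drop i.toNat).take_prefix _).isInfix.trans
      (key.toList.drop_suffix i.toNat).isInfix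
  · intro hinf
    obtain ⟨s, t, hst⟩ := hinf
    have hlen : key.toList.length = s.length + c.toList.length + t.length := by
      rw [← hst]; simp; omega
    refine List.mem_flatMap.mpr ⟨(s.length : Int), ?_, List.mem_map.mpr
      ⟨((s.length : Int) + (c.toList.length : Int)), ?_, ?_⟩⟩
    · rw [PySem.List.mem_pyRange_one, PySem.Str.len_eq, hlen]
      push_cast; omega
    · rw [PySem.List.mem_pyRange_one, PySem.Str.len_eq, hlen]
      push_cast; omega
    · refine String.toList_inj.mp ?_
      rw [PySem.Str.toList_slice]
      show PySem.List.slice _ _ _ = _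
      rw [PySem.List.slice_natCast_add, ← hst]
      simp

-- the 'for c in subs' loop never changes which keys the bucket table has
theorem inner_fold_contains (kv : String × String) (ks : List String) :
    ∀ (b : PySem.Dict String (List (String × String))) (x : String),
      (ks.foldl (fun b c => if b.contains c then b.modify c [] (fun l => l ++ [kv]) else b) b).contains x
        = b.contains x := by
  induction ks with
  | nil => intro b x; rfl
  | cons y ys ih =>
    intro b x
    rw [List.foldl_cons, ih]
    split
    · rw [PySem.Dict.contains_modify]
      by_cases hxy : x = y
      · subst hxy; simp_all
      · simp [beq_iff_eq, hxy]
    · rfl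

-- the 'for c in subs' loop leaves buckets of conditions outside subs unchanged
theorem inner_fold_not_mem (kv : String × String) (ks : List String) :
    ∀ (b : PySem.Dict String (List (String × String))) (c : String), c ∉ ks →
      (ks.foldl (fun b s => if b.contains s then b.modify s [] (fun l => l ++ [kv]) else b) b).getD c []
        = b.getD c [] := by
  induction ks with
  | nil => intro b c _; rfl
  | cons x xs ih =>
    intro b c hc
    have hcx : c ≠ x := fun h => hc (h ▸ List.mem_cons_self)
    have hcxs : c ∉ xs := fun h => hc (List.mem_cons_of_mem _ h)
    rw [List.foldl_cons, ih _ c hcxs]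
    split
    · rw [PySem.Dict.getD_modify]; simp [hcx]
    · rfl

-- the 'for c in subs' loop appends kv to exactly the present buckets of substrings
theorem inner_fold_mem (kv : String × String) (ks : List String) (hnd : ks.Nodup) :
    ∀ (b : PySem.Dict String (List (String × String))) (c : String), c ∈ ks →
      (ks.foldl (fun b s => if b.contains s then b.modify s [] (fun l => l ++ [kv]) else b) b).getD c []
        = if b.contains c then b.getD c [] ++ [kv] else b.getD c [] := by
  induction ks with
  | nil => intro b c hc; cases hc
  | cons x xs ih =>
    intro b c hc
    simp only [List.nodup_cons] at hnd
    rcases List.mem_cons.mp hc with h | h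
    · subst h
      rw [List.foldl_cons, inner_fold_not_mem _ _ _ _ hnd.1]
      split
      · rw [PySem.Dict.getD_modify]; simp
      · rfl
    · have hcx : c ≠ x := fun he => hnd.1 (he ▸ h)
      rw [List.foldl_cons, ih hnd.2 _ c h]
      split
      · rw [PySem.Dict.contains_modify, PySem.Dict.getD_modify]
        simp [hcx]
      · rfl

-- the pass over the dict items fills each present bucket with the items whose key contains c
theorem outer_fold_buckets (l : List (String × String)) :
    ∀ (b : PySem.Dict String (List (String × String))) (c : String), b.contains c = true →
      (l.foldl
        (fun b kv =>
          (PySem.Set.ofList ((PySem.List.pyRange 0 (PySem.Str.len kv.1 + 1) 1).flatMap (fun i =>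
            (PySem.List.pyRange i (PySem.Str.len kv.1 + 1) 1).map (fun j =>
              PySem.Str.slice kv.1 (some i) (some j))))).foldl
            (fun b s => if b.contains s then b.modify s [] (fun l => l ++ [kv]) else b) b)
        b).getD c []
        = b.getD c [] ++ l.filter (fun kv => PySem.Str.isIn c kv.1) := by
  induction l with
  | nil => intro b c _; simp
  | cons kv tl ih =>
    intro b c hbc
    set subs := PySem.Set.ofList ((PySem.List.pyRange 0 (PySem.Str.len kv.1 + 1) 1).flatMap (fun i =>
      (PySem.List.pyRange i (PySem.Str.len kv.1 + 1) 1).map (fun j =>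
        PySem.Str.slice kv.1 (some i) (some j)))) with hsubs
    have hnd : subs.Nodup := PySem.Set.nodup_ofList _
    have hin : c ∈ subs ↔ PySem.Str.isIn c kv.1 = true := by
      rw [hsubs, PySem.Set.mem_ofList]
      exact mem_slices_iff_isIn kv.1 c
    rw [List.foldl_cons, ih _ c (by rw [inner_fold_contains]; exact hbc), List.filter_cons]
    by_cases hc : c ∈ subs
    · rw [inner_fold_mem kv subs hnd b c hc, hbc]
      have h' : PySem.Chars.isIn c.toList kv.1.toList = true := hin.mp hc
      simp [h']
    · rw [inner_fold_not_mem kv subs b c hc]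
      cases h : PySem.Chars.isIn c.toList kv.1.toList
      · simp [h]
      · exact absurd (hin.mpr h) hc

theorem checkSubstringInCondNames_spec_aux (cond_iter : List String) (matches_found : List String)
    (mondo_dict : List (String × String)) (step_num : Int)
    (hnd : (mondo_dict.map Prod.fst).Nodup) :
    checkSubstringInCondNames cond_iter matches_found mondo_dict step_num
      = checkSubstringInCondNames_alt cond_iter matches_found mondo_dict step_num := by
  unfold checkSubstringInCondNames
  rw [foldl_append_if_flatMap]
  simp only [List.nil_append]
  simp only [checkSubstringInCondNames_alt]
  set wanted := cond_iter.filter (fun c => decide (matches_found.contains c = false)) with hw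
  set buckets0 : PySem.Dict String (List (String × String)) :=
    wanted.foldl (fun b c => b.insert c []) PySem.Dict.empty with hb0
  -- the bucket keys are exactly the distinct wanted conditions
  have hkeys : buckets0.keys = PySem.Set.ofList wanted := by
    rw [hb0, PySem.Dict.keys_foldl_insert]
    simp [PySem.Set.ofList_eq_foldl, PySem.Set.update, PySem.Dict.keys_empty]
  have hinit : ∀ c, buckets0.getD c [] = [] := by
    intro c
    exact getD_init_buckets wanted PySem.Dict.empty (fun c' => by simp [PySem.Dict.getD_empty]) c
  refine List.flatMap_congr (fun c hc => ?_)
  have hck : buckets0.contains c = true := by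
    rw [PySem.Dict.contains_iff_mem_keys, hkeys]
    exact (PySem.Set.mem_ofList wanted c).mpr hc
  rw [outer_fold_buckets mondo_dict buckets0 c hck, hinit c, List.nil_append]
  -- both sides are the c-hits, as key-scan vs substring-index
  rw [List.filter_map, List.map_map]
  refine List.map_congr_left ?_
  intro kv hkv
  have hm : kv ∈ mondo_dict := List.mem_of_mem_filter hkv
  simp [Function.comp, find?_of_mem_nodup mondo_dict kv hnd hm]

-- ===== VERDICT (by name: the statement is the Claim_ definition above) =====
theorem checkSubstringInCondNames_spec : Claim_equal_checkSubstringInCondNames := by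
  intro cond_iter matches_found mondo_dict step_num _ hpre
  exact checkSubstringInCondNames_spec_aux cond_iter matches_found mondo_dict step_num hpre
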